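-- pv_equiv track=rewrite | github.com/oscargus/timink | src/timink/ti_signalspec.py | getFirstInvalidMultiPathState
-- ===== SOURCE A (Python) =====
-- def getFirstInvalidMultiPathState(signalClusterSpec):
--     invalidCharRange = None
--     start = signalClusterSpec.find('(')
--     while invalidCharRange is None and start >= 0:
--         end = signalClusterSpec.find(')', start + 1)
--         if end > start:
--             multiStateStr = signalClusterSpec[start + 1: end].replace('\t', '').replace(' ', '')
--             if len(multiStateStr) == 0 or len(multiStateStr.strip('01-')) > 0:
--                 invalidCharRange = (start, end + 1)
--             start = signalClusterSpec.find('(', end + 1)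
--         else:
--             invalidCharRange = (start, len(signalClusterSpec))
--     return invalidCharRange
-- ===== SOURCE B (Python) =====
-- def getFirstInvalidMultiPathState(signalClusterSpec):
--     start = None
--     acc = ''
--     for i, ch in enumerate(signalClusterSpec):
--         if start is None:
--             if ch == '(':
--                 start = i
--                 acc = ''
--         elif ch == ')':
--             if len(acc) == 0 or len(acc.strip('01-')) > 0:
--                 return (start, i + 1)
--             start = None
--         elif ch != '\t' and ch != ' ':
--             acc += ch
--     if start is not None:
--         return (start, len(signalClusterSpec))
--     return None
-- ===== Notes on version B (the rewrite author's own statement) =====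
-- stated objective: alternative
-- what changed: A scans with repeated str.find calls, slicing out each parenthesized group and cleaning it with replace; B is a single for-loop state machine over enumerate(spec) that tracks the pending '(' index and accumulates the group content character by character.
import Mathlib
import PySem

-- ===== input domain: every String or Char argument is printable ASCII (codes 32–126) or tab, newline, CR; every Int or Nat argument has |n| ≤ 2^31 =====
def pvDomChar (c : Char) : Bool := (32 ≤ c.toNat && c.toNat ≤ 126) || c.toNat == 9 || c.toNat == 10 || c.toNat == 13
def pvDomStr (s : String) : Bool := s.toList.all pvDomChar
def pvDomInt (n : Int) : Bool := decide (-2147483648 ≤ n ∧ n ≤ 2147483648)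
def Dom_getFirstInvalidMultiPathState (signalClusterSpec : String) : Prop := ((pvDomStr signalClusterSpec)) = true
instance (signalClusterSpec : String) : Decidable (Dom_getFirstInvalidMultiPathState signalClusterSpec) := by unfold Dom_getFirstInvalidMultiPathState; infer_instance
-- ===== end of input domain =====

-- B replaces A's repeated str.find/slice scanning by a single-pass state machine over
-- enumerate(spec); same O(n) cost, different decomposition (objective: alternative).


-- ===== PORT A =====
-- A's while-loop; fuel (length+1) only makes the recursion total, it never runs out
-- (each iteration moves 'start' right by ≥ 2 or terminates).
def pvALoop (cs : List Char) (start : Int) : Nat → Option (Int × Int)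
  | 0 => none
  | fuel + 1 =>
    if 0 ≤ start then
      let e := PySem.Chars.findFrom cs [')'] (start + 1)
      if start < e then
        let ms := PySem.Chars.replace
          (PySem.Chars.replace (PySem.List.slice cs (some (start + 1)) (some e)) ['\t'] []) [' '] []
        if ms.length = 0 ∨ (PySem.Chars.stripChars ms ['0', '1', '-']).length > 0 then
          some (start, e + 1)
        else
          pvALoop cs (PySem.Chars.findFrom cs ['('] (e + 1)) fuel
      else
        some (start, (cs.length : Int))
    else
      none

def getFirstInvalidMultiPathState (signalClusterSpec : String) : Option (Int × Int) :=
  pvALoop signalClusterSpec.toList (PySem.Chars.find signalClusterSpec.toList ['('])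
    (signalClusterSpec.toList.length + 1)

-- ===== PORT B =====
-- B's for-loop over enumerate: i is the current index, start the pending '(' (None = outside
-- a group), acc the group content with '\t' and ' ' removed.
def pvBLoop (n : Nat) : List Char → Nat → Option Int → List Char → Option (Int × Int)
  | [], _, none, _ => none
  | [], _, some st, _ => some (st, (n : Int))
  | c :: rest, i, none, acc =>
    if c = '(' then pvBLoop n rest (i + 1) (some (i : Int)) []
    else pvBLoop n rest (i + 1) none acc
  | c :: rest, i, some st, acc =>
    if c = ')' then
      if acc.length = 0 ∨ (PySem.Chars.stripChars acc ['0', '1', '-']).length > 0 then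
        some (st, (i : Int) + 1)
      else pvBLoop n rest (i + 1) none []
    else if c = '\t' ∨ c = ' ' then pvBLoop n rest (i + 1) (some st) acc
    else pvBLoop n rest (i + 1) (some st) (acc ++ [c])

def getFirstInvalidMultiPathState_alt (signalClusterSpec : String) : Option (Int × Int) :=
  pvBLoop signalClusterSpec.toList.length signalClusterSpec.toList 0 none []

-- ===== PRECONDITION & SPEC =====
def Spec_getFirstInvalidMultiPathState (signalClusterSpec : String) (out : Option (Int × Int)) : Prop := out = getFirstInvalidMultiPathState_alt signalClusterSpec
instance (signalClusterSpec : String) (out : Option (Int × Int)) : Decidable (Spec_getFirstInvalidMultiPathState signalClusterSpec out) := by unfold Spec_getFirstInvalidMultiPathState; infer_instance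

-- ===== CLAIM (what is proved, stated in full; the proofs are below) =====
def Claim_equal_getFirstInvalidMultiPathState : Prop := ∀ (signalClusterSpec : String), Dom_getFirstInvalidMultiPathState signalClusterSpec → Spec_getFirstInvalidMultiPathState signalClusterSpec (getFirstInvalidMultiPathState signalClusterSpec)

-- ===== LEMMAS AND PROOFS =====

lemma pv_find_char (cs : List Char) (c : Char) (q : Nat) (hq : q ≤ cs.length) :
    (PySem.Chars.findFrom cs [c] (q : Int) = -1 ∧ ∀ i, q ≤ i → cs[i]? ≠ some c)
    ∨ ∃ j : Nat, PySem.Chars.findFrom cs [c] (q : Int) = (j : Int) ∧ q ≤ j ∧ j < cs.length ∧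
        cs[j]? = some c ∧ ∀ i, q ≤ i → i < j → cs[i]? ≠ some c := by
  by_cases h : PySem.Chars.findFrom cs [c] (q : Int) = -1
  · left
    refine ⟨h, ?_⟩
    rw [PySem.Chars.findFrom_natCast_eq_neg_one_iff cs [c] q hq] at h
    intro i hi hc
    apply h
    have hmem : c ∈ cs.drop q := by
      rw [List.mem_iff_getElem?]
      exact ⟨i - q, by rw [List.getElem?_drop, Nat.add_sub_cancel' hi]; exact hc⟩
    obtain ⟨s, t, hst⟩ := List.mem_iff_append.mp hmem
    exact ⟨s, t, by simp [hst]⟩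
  · right
    obtain ⟨hle, hpre, hmin⟩ := PySem.Chars.findFrom_natCast_spec cs [c] q hq h
    have h0 : (0 : Int) ≤ PySem.Chars.findFrom cs [c] (q : Int) := by
      have : (0 : Int) ≤ (q : Int) := by positivity
      omega
    refine ⟨(PySem.Chars.findFrom cs [c] (q : Int)).toNat, by omega, by omega, ?_, ?_, ?_⟩
    · obtain ⟨t, ht⟩ := hpre
      have hlen : (cs.drop ((PySem.Chars.findFrom cs [c] (q : Int)).toNat)).length = t.length + 1 := by
        rw [← ht]; simp
      rw [List.length_drop] at hlen
      omega
    · obtain ⟨t, ht⟩ := hpre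
      rw [← List.head?_drop, ← ht]
      rfl
    · intro i hqi hil hci
      refine hmin i hqi hil ⟨(cs.drop i).tail, ?_⟩
      have : (cs.drop i).head? = some c := by rw [List.head?_drop]; exact hci
      simpa using List.cons_head?_tail this

lemma pv_replace_go_filter (c : Char) :
    ∀ (l acc : List Char) (fuel : Nat), l.length ≤ fuel →
      PySem.Chars.replace.go [c] [] fuel l acc = acc.reverse ++ l.filter (· ≠ c) := by
  intro l
  induction l with
  | nil =>
    intro acc fuel _
    cases fuel <;> simp [PySem.Chars.replace.go]
  | cons c' t ih =>
    intro acc fuel hf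
    cases fuel with
    | zero => simp at hf
    | succ f =>
      by_cases hc : c = c'
      · subst hc
        simp [PySem.Chars.replace.go, List.isPrefixOf, ih acc f (by simpa using hf)]
      · simp only [PySem.Chars.replace.go, List.isPrefixOf]
        rw [if_neg (by simp [hc]), ih (c' :: acc) f (by simpa using hf)]
        simp [Ne.symm hc]
lemma pv_replace_filter (c : Char) (l : List Char) :
    PySem.Chars.replace l [c] [] = l.filter (· ≠ c) := by
  rw [PySem.Chars.replace]
  simp [pv_replace_go_filter c l [] l.length le_rfl]

-- decompose cs.drop q = c :: rest
lemma pv_drop_cons {cs rest : List Char} {c : Char} {q : Nat} (h : cs.drop q = c :: rest) :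
    cs[q]? = some c ∧ rest = cs.drop (q + 1) ∧ q < cs.length := by
  refine ⟨by rw [← List.head?_drop, h]; rfl, by rw [← List.tail_drop, h]; rfl, ?_⟩
  have := congrArg List.length h
  rw [List.length_drop] at this
  simp at this
  omega

lemma pv_b_no_open (cs : List Char) :
    ∀ (t : List Char) (q : Nat) (acc : List Char), t = cs.drop q →
      (∀ i, q ≤ i → cs[i]? ≠ some '(') →
      pvBLoop cs.length t q none acc = none := by
  intro t
  induction t with
  | nil => intro q acc _ _; simp [pvBLoop]
  | cons c rest ih =>
    intro q acc ht hno
    obtain ⟨hc, hrest, _⟩ := pv_drop_cons ht.symm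
    have : c ≠ '(' := fun h => hno q le_rfl (h ▸ hc)
    rw [pvBLoop, if_neg this]
    exact ih (q + 1) acc hrest (fun i hi => hno i (by omega))

lemma pv_b_skip_to_open (cs : List Char) :
    ∀ (t : List Char) (q : Nat) (acc : List Char) (st : Nat), t = cs.drop q →
      q ≤ st → cs[st]? = some '(' → (∀ i, q ≤ i → i < st → cs[i]? ≠ some '(') →
      pvBLoop cs.length t q none acc = pvBLoop cs.length (cs.drop (st + 1)) (st + 1) (some (st : Int)) [] := by
  intro t
  induction t with
  | nil =>
    intro q acc st ht hqst hat _
    have hst : st < cs.length := (List.getElem?_eq_some_iff.mp hat).1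
    have : cs.length ≤ q := by
      have := congrArg List.length ht
      simp [List.length_drop] at this
      omega
    omega
  | cons c rest ih =>
    intro q acc st ht hqst hat hmin
    obtain ⟨hc, hrest, _⟩ := pv_drop_cons ht.symm
    by_cases hqe : q = st
    · subst hqe
      have : c = '(' := by rw [hc] at hat; exact (Option.some_inj.mp hat)
      rw [pvBLoop, if_pos this, hrest]
    · have : c ≠ '(' := fun h => hmin q le_rfl (by omega) (h ▸ hc)
      rw [pvBLoop, if_neg this]
      exact ih (q + 1) acc st hrest (by omega) hat (fun i hi hi2 => hmin i (by omega) hi2)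

lemma pv_b_no_close (cs : List Char) :
    ∀ (t : List Char) (q : Nat) (acc : List Char) (st : Int), t = cs.drop q →
      (∀ i, q ≤ i → cs[i]? ≠ some ')') →
      pvBLoop cs.length t q (some st) acc = some (st, (cs.length : Int)) := by
  intro t
  induction t with
  | nil => intro q acc st _ _; simp [pvBLoop]
  | cons c rest ih =>
    intro q acc st ht hno
    obtain ⟨hc, hrest, _⟩ := pv_drop_cons ht.symm
    have hcne : c ≠ ')' := fun h => hno q le_rfl (h ▸ hc)
    rw [pvBLoop, if_neg hcne]
    split
    · exact ih (q + 1) acc st hrest (fun i hi => hno i (by omega))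
    · exact ih (q + 1) (acc ++ [c]) st hrest (fun i hi => hno i (by omega))

lemma pv_b_to_close (cs : List Char) :
    ∀ (t : List Char) (q : Nat) (acc : List Char) (st : Int) (e : Nat), t = cs.drop q →
      q ≤ e → cs[e]? = some ')' → (∀ i, q ≤ i → i < e → cs[i]? ≠ some ')') →
      pvBLoop cs.length t q (some st) acc =
        (let ms := acc ++ (((cs.drop q).take (e - q)).filter (· ≠ '\t')).filter (· ≠ ' ');
         if ms.length = 0 ∨ (PySem.Chars.stripChars ms ['0', '1', '-']).length > 0 then
           some (st, (e : Int) + 1)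
         else pvBLoop cs.length (cs.drop (e + 1)) (e + 1) none []) := by
  intro t
  induction t with
  | nil =>
    intro q acc st e ht hqe hat _
    have he : e < cs.length := (List.getElem?_eq_some_iff.mp hat).1
    have : cs.length ≤ q := by
      have := congrArg List.length ht
      simp [List.length_drop] at this
      omega
    omega
  | cons c rest ih =>
    intro q acc st e ht hqe hat hmin
    obtain ⟨hc, hrest, _⟩ := pv_drop_cons ht.symm
    by_cases hq : q = e
    · subst hq
      have hcp : c = ')' := by rw [hc] at hat; exact (Option.some_inj.mp hat)
      rw [pvBLoop, if_pos hcp]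
      simp [← ht, hrest]
    · have hlt : q < e := by omega
      have hcne : c ≠ ')' := fun h => hmin q le_rfl hlt (h ▸ hc)
      have htake : (cs.drop q).take (e - q) = c :: ((cs.drop (q + 1)).take (e - (q + 1))) := by
        rw [← ht, ← hrest]
        have : e - q = (e - (q + 1)) + 1 := by omega
        rw [this, List.take_succ_cons]
      rw [pvBLoop, if_neg hcne]
      split
      · rename_i hws
        rw [ih (q + 1) acc st e hrest (by omega) hat (fun i hi hi2 => hmin i (by omega) hi2)]
        simp only [htake]
        rcases hws with h | h <;> subst h <;> simp
      · rename_i hws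
        rw [ih (q + 1) (acc ++ [c]) st e hrest (by omega) hat (fun i hi hi2 => hmin i (by omega) hi2)]
        simp only [htake]
        have h1 : c ≠ '\t' := fun h => hws (Or.inl h)
        have h2 : c ≠ ' ' := fun h => hws (Or.inr h)
        simp [h1, h2]

lemma pv_main (cs : List Char) :
    ∀ (fuel q : Nat), q ≤ cs.length → cs.length + 1 - q ≤ fuel →
      pvALoop cs (PySem.Chars.findFrom cs ['('] (q : Int)) fuel
        = pvBLoop cs.length (cs.drop q) q none [] := by
  intro fuel
  induction fuel with
  | zero => intro q hq hf; omega
  | succ f ih =>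
    intro q hq hf
    rcases pv_find_char cs '(' q hq with ⟨hm1, hno⟩ | ⟨st, heq, hqst, hstlt, hat, hmin⟩
    · rw [hm1, pv_b_no_open cs _ q [] rfl hno]
      simp [pvALoop]
    · rw [heq, pv_b_skip_to_open cs _ q [] st rfl hqst hat hmin]
      have hq2 : st + 1 ≤ cs.length := by omega
      have hcast : (st : Int) + 1 = ((st + 1 : Nat) : Int) := by push_cast; ring
      rcases pv_find_char cs ')' (st + 1) hq2 with ⟨hm1', hno'⟩ | ⟨e, heq', hqe', helt, hat', hmin'⟩
      · rw [pvALoop, if_pos (by positivity), hcast, hm1',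
          pv_b_no_close cs _ (st + 1) [] (st : Int) rfl hno']
        norm_num
      · rw [pvALoop, if_pos (by positivity), hcast, heq',
          pv_b_to_close cs _ (st + 1) [] (st : Int) e rfl hqe' hat' (fun i h1 h2 => hmin' i h1 h2)]
        have hlt2 : (st : Int) < (e : Int) := by exact_mod_cast Nat.lt_of_succ_le hqe'
        rw [if_pos hlt2]
        rw [PySem.List.slice_natCast, pv_replace_filter, pv_replace_filter]
        simp only [List.nil_append]
        split
        · rfl
        · have he1 : ((e : Int) + 1) = ((e + 1 : Nat) : Int) := by push_cast; ring
          rw [he1, ih (e + 1) (by omega) (by omega)]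

-- ===== VERDICT (by name: the statement is the Claim_ definition above) =====
theorem getFirstInvalidMultiPathState_spec : Claim_equal_getFirstInvalidMultiPathState := by
  intro s _
  unfold Spec_getFirstInvalidMultiPathState getFirstInvalidMultiPathState getFirstInvalidMultiPathState_alt
  rw [← PySem.Chars.findFrom_zero]
  have h := pv_main s.toList (s.toList.length + 1) 0 (Nat.zero_le _) (by omega)
  simpa using h
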